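-- pv_equiv track=rewrite | github.com/sfr9802/async-ocr-rag-multimodal-pipeline | ai-worker/app/capabilities/rag/token_aware_chunker.py | _pick_strategy
-- ===== SOURCE A (Python) =====
-- STRATEGY_SHORT = "short"  # input fit in one chunk
--
-- STRATEGY_PARAGRAPH = "paragraph"
--
-- STRATEGY_LINE_BULLET = "line_bullet"
--
-- STRATEGY_LINE_BREAK = "line_break"
--
-- STRATEGY_SENTENCE = "sentence"
--
-- STRATEGY_HARD_TOKEN = "hard_token"
--
-- STRATEGY_HARD_CHAR = "hard_char"  # used when no tokenizer encode fn
--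
-- def _pick_strategy(strategies: set) -> str:
--     """Pick the deepest strategy label from a set.
--
--     Ladder order: paragraph < line_bullet < line_break < sentence <
--     hard_token / hard_char. ``short`` only applies when the input was
--     one piece — we promote to whichever boundary actually contributed.
--     """
--     order = (
--         STRATEGY_HARD_TOKEN, STRATEGY_HARD_CHAR,
--         STRATEGY_SENTENCE, STRATEGY_LINE_BREAK,
--         STRATEGY_LINE_BULLET, STRATEGY_PARAGRAPH,
--         STRATEGY_SHORT,
--     )
--     for s in order:
--         if s in strategies:
--             return s
--     return STRATEGY_SHORT
-- ===== SOURCE B (Python) =====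
-- STRATEGY_SHORT = "short"
--
-- _RANK = {
--     "hard_token": 0,
--     "hard_char": 1,
--     "sentence": 2,
--     "line_break": 3,
--     "line_bullet": 4,
--     "paragraph": 5,
--     "short": 6,
-- }
--
--
-- def _pick_strategy(strategies: set) -> str:
--     known = [s for s in strategies if s in _RANK]
--     return min(known, key=_RANK.get, default=STRATEGY_SHORT)
-- ===== Notes on version B (the rewrite author's own statement) =====
-- stated objective: idiomatic
-- what changed: Replaces the scan over the fixed priority tuple with membership tests by a rank table: B filters the input set to known labels and takes min(..., key=rank, default='short'), traversing the input instead of the priority order.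
import Mathlib
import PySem

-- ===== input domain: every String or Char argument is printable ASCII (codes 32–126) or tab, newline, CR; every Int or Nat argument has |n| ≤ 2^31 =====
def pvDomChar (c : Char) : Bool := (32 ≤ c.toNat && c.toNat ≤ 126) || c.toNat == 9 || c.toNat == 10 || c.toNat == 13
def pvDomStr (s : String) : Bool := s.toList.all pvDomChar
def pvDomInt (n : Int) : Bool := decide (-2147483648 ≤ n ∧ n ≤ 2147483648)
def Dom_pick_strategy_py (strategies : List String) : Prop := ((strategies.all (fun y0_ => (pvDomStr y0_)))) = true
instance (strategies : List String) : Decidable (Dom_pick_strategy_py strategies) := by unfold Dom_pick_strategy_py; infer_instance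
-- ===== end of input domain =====

-- B replaces A's scan over the fixed priority tuple by a rank table and a min over
-- the input's known labels (objective: idiomatic).

-- ===== PORT A =====
def pick_strategy_py (strategies : List String) : String :=
  let order := ["hard_token", "hard_char", "sentence", "line_break", "line_bullet", "paragraph", "short"]
  match order.find? (fun s => strategies.contains s) with
  | some s => s
  | none => "short"

-- ===== PORT B =====
def pvRank : PySem.Dict String Int :=
  PySem.Dict.ofList [("hard_token", 0), ("hard_char", 1), ("sentence", 2),
    ("line_break", 3), ("line_bullet", 4), ("paragraph", 5), ("short", 6)]

-- min(known, key=_RANK.get, default="short"); on the filtered list the key never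
-- falls back to the default 7, so getD is exact for _RANK.get here
def pick_strategy_py_alt (strategies : List String) : String :=
  let known := strategies.filter (fun s => pvRank.contains s)
  match PySem.List.min? known (fun s => pvRank.getD s 7) with
  | some m => m
  | none => "short"

-- ===== PRECONDITION & SPEC =====
def Spec_pick_strategy_py (strategies : List String) (out : String) : Prop := out = pick_strategy_py_alt strategies
instance (strategies : List String) (out : String) : Decidable (Spec_pick_strategy_py strategies out) := by unfold Spec_pick_strategy_py; infer_instance

-- ===== CLAIM (what is proved, stated in full; the proofs are below) =====
def Claim_equal_pick_strategy_py : Prop := ∀ (strategies : List String), Dom_pick_strategy_py strategies → Spec_pick_strategy_py strategies (pick_strategy_py strategies)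

-- ===== LEMMAS AND PROOFS =====

-- a string the rank table contains is one of the seven literal labels
theorem pv_mem7 (x : String) (h : pvRank.contains x = true) :
    x = "hard_token" ∨ x = "hard_char" ∨ x = "sentence" ∨ x = "line_break" ∨
    x = "line_bullet" ∨ x = "paragraph" ∨ x = "short" := by
  rw [show pvRank = PySem.Dict.mk [("hard_token", 0), ("hard_char", 1), ("sentence", 2),
    ("line_break", 3), ("line_bullet", 4), ("paragraph", 5), ("short", 6)] from by decide] at h
  simp at h
  tauto

-- ===== VERDICT (by name: the statement is the Claim_ definition above) =====
theorem pick_strategy_py_spec : Claim_equal_pick_strategy_py := by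
  intro l _
  show pick_strategy_py l = pick_strategy_py_alt l
  unfold pick_strategy_py_alt
  cases hm : PySem.List.min? (l.filter fun s => pvRank.contains s) (fun s => pvRank.getD s 7) with
  | none =>
      -- no known label occurs in l, so every membership test in A's scan fails
      have hnil := (PySem.List.min?_eq_none_iff _ _).mp hm
      rw [List.filter_eq_nil_iff] at hnil
      have n0 : "hard_token" ∉ l := fun h => hnil _ h (by decide)
      have n1 : "hard_char" ∉ l := fun h => hnil _ h (by decide)
      have n2 : "sentence" ∉ l := fun h => hnil _ h (by decide)
      have n3 : "line_break" ∉ l := fun h => hnil _ h (by decide)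
      have n4 : "line_bullet" ∉ l := fun h => hnil _ h (by decide)
      have n5 : "paragraph" ∉ l := fun h => hnil _ h (by decide)
      have n6 : "short" ∉ l := fun h => hnil _ h (by decide)
      simp [pick_strategy_py, List.find?, n0, n1, n2, n3, n4, n5, n6, hm]
  | some m =>
      have hmem := PySem.List.min?_mem hm
      have hmin := PySem.List.min?_isMin hm
      rw [List.mem_filter] at hmem
      obtain ⟨hml, hkn⟩ := hmem
      -- no label of strictly smaller rank than m can occur in l
      have hno : ∀ y : String, pvRank.contains y = true →
          pvRank.getD y 7 < pvRank.getD m 7 → y ∉ l := by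
        intro y hy hlt hmem
        have := hmin y (List.mem_filter.mpr ⟨hmem, hy⟩)
        omega
      rcases pv_mem7 m hkn with h | h | h | h | h | h | h <;> subst h
      · -- m = "hard_token"
        simp [pick_strategy_py, List.find?, hml, hm]
      · -- m = "hard_char"
        have n0 : "hard_token" ∉ l := hno "hard_token" (by decide) (by decide)
        simp [pick_strategy_py, List.find?, n0, hml, hm]
      · -- m = "sentence"
        have n0 : "hard_token" ∉ l := hno "hard_token" (by decide) (by decide)
        have n1 : "hard_char" ∉ l := hno "hard_char" (by decide) (by decide)
        simp [pick_strategy_py, List.find?, n0, n1, hml, hm]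
      · -- m = "line_break"
        have n0 : "hard_token" ∉ l := hno "hard_token" (by decide) (by decide)
        have n1 : "hard_char" ∉ l := hno "hard_char" (by decide) (by decide)
        have n2 : "sentence" ∉ l := hno "sentence" (by decide) (by decide)
        simp [pick_strategy_py, List.find?, n0, n1, n2, hml, hm]
      · -- m = "line_bullet"
        have n0 : "hard_token" ∉ l := hno "hard_token" (by decide) (by decide)
        have n1 : "hard_char" ∉ l := hno "hard_char" (by decide) (by decide)
        have n2 : "sentence" ∉ l := hno "sentence" (by decide) (by decide)
        have n3 : "line_break" ∉ l := hno "line_break" (by decide) (by decide)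
        simp [pick_strategy_py, List.find?, n0, n1, n2, n3, hml, hm]
      · -- m = "paragraph"
        have n0 : "hard_token" ∉ l := hno "hard_token" (by decide) (by decide)
        have n1 : "hard_char" ∉ l := hno "hard_char" (by decide) (by decide)
        have n2 : "sentence" ∉ l := hno "sentence" (by decide) (by decide)
        have n3 : "line_break" ∉ l := hno "line_break" (by decide) (by decide)
        have n4 : "line_bullet" ∉ l := hno "line_bullet" (by decide) (by decide)
        simp [pick_strategy_py, List.find?, n0, n1, n2, n3, n4, hml, hm]
      · -- m = "short"
        have n0 : "hard_token" ∉ l := hno "hard_token" (by decide) (by decide)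
        have n1 : "hard_char" ∉ l := hno "hard_char" (by decide) (by decide)
        have n2 : "sentence" ∉ l := hno "sentence" (by decide) (by decide)
        have n3 : "line_break" ∉ l := hno "line_break" (by decide) (by decide)
        have n4 : "line_bullet" ∉ l := hno "line_bullet" (by decide) (by decide)
        have n5 : "paragraph" ∉ l := hno "paragraph" (by decide) (by decide)
        simp [pick_strategy_py, List.find?, n0, n1, n2, n3, n4, n5, hml, hm]
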